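-- pv_equiv track=rewrite | github.com/demist/tp_task6 | Boyarnikov924/main.py | shuffle_text
-- ===== SOURCE A (Python) =====
-- def shuffle_text(text, permutation):
--     my_text = list(text)
--     new_text = list(text)
--     shuffle_period = len(permutation)
--     text_length = len(text)
--     processing_length = text_length - text_length % shuffle_period
--     for position in range(processing_length):
--         sub_position = position % shuffle_period
--         shift = permutation[sub_position]
--         from_position = position - sub_position + shift
--         new_text[position] = my_text[from_position]
--     return ''.join(new_text)
-- ===== SOURCE B (Python) =====
-- def shuffle_text(text, permutation):
--     period = len(permutation)
--     num_blocks = len(text) // period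
--     # column-major: gather, for each permutation slot, all its source characters
--     # across the blocks, then transpose the columns back into row order
--     columns = [[text[b * period + shift] for b in range(num_blocks)]
--                for shift in permutation]
--     body = ''.join(''.join(row) for row in zip(*columns))
--     return body + text[num_blocks * period:]
-- ===== Notes on version B (the rewrite author's own statement) =====
-- stated objective: alternative
-- what changed: Replaces A's single row-major in-place pass (position % period arithmetic over a mutable char list) with a column-major two-stage algorithm: gather one source column per permutation slot across all blocks, then transpose the columns (zip) back into row order and append the untouched tail.
import Mathlib
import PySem

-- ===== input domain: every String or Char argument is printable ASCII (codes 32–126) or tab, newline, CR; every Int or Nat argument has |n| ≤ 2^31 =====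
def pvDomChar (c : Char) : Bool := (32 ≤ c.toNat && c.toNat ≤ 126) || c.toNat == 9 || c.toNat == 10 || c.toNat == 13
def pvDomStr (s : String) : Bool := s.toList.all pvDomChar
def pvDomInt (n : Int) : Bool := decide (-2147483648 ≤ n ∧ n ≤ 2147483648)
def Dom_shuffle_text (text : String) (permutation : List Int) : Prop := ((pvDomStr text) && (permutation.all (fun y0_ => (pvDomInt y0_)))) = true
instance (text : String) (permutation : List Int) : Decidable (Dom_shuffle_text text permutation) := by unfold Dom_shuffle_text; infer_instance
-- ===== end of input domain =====

-- B is a column-major two-stage algorithm (gather one source column per permutation slot,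
-- then transpose back into row order) instead of A's row-major in-place update pass;
-- an alternative decomposition of the same cost.

-- ===== PORT A =====
def shuffle_text (text : String) (permutation : List Int) : String :=
  let my_text := text.toList
  let new_text := text.toList
  let shuffle_period : Int := PySem.List.len permutation
  let text_length : Int := PySem.List.len my_text
  let processing_length : Int := text_length - PySem.Int.mod text_length shuffle_period
  let out := (PySem.List.pyRange 0 processing_length 1).foldl (fun nt position =>
      let sub_position := PySem.Int.mod position shuffle_period
      let shift := PySem.List.pyGetD permutation sub_position 0
      let from_position := position - sub_position + shift
      PySem.List.pySetD nt position (PySem.List.pyGetD my_text from_position ' ')) new_text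
  String.ofList out

-- ===== PORT B =====
-- hand port of Python's zip(*columns): rows of heads while every column is nonempty
-- (exact: zip() with no arguments and zip over an exhausted column both stop)
def pvZipRows (cols : List (List Char)) : List (List Char) :=
  if h : cols ≠ [] ∧ cols.all (fun c => !c.isEmpty) then
    cols.map (fun c => c.headD ' ') :: pvZipRows (cols.map (fun c => c.tail))
  else []
termination_by (cols.headD []).length
decreasing_by
  obtain ⟨c, rest, rfl⟩ : ∃ c rest, cols = c :: rest := by
    cases cols with
    | nil => exact absurd rfl h.1
    | cons c rest => exact ⟨c, rest, rfl⟩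
  have hc : ¬ c.isEmpty := by simpa using (List.all_eq_true.mp h.2 c (by simp))
  cases c with
  | nil => simp at hc
  | cons x xs => simp

def shuffle_text_alt (text : String) (permutation : List Int) : String :=
  let chars := text.toList
  let period := permutation.length
  let num_blocks := chars.length / period
  let columns := permutation.map (fun shift =>
    (List.range num_blocks).map (fun b =>
      PySem.List.pyGetD chars (((b * period : Nat) : Int) + shift) ' '))
  String.ofList ((pvZipRows columns).flatten ++ chars.drop (num_blocks * period))

-- ===== PRECONDITION & SPEC =====
-- Pre_ excludes exactly the inputs on which Python A raises: the empty permutation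
-- (ZeroDivisionError) and any block index base+shift outside Python's index range
-- (IndexError); B raises on exactly the same inputs.
def Pre_shuffle_text (text : String) (permutation : List Int) : Prop :=
  permutation ≠ [] ∧
  ∀ b ∈ List.range (text.toList.length / permutation.length), ∀ s ∈ permutation,
    PySem.Raise.InRange text.toList.length (((b * permutation.length : Nat) : Int) + s)
instance (text : String) (permutation : List Int) : Decidable (Pre_shuffle_text text permutation) := by
  unfold Pre_shuffle_text; infer_instance

def pvWitness_shuffle_text : String × List Int := ("abcde", [1, 0])

def Spec_shuffle_text (text : String) (permutation : List Int) (out : String) : Prop := out = shuffle_text_alt text permutation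
instance (text : String) (permutation : List Int) (out : String) : Decidable (Spec_shuffle_text text permutation out) := by unfold Spec_shuffle_text; infer_instance

-- ===== CLAIM (what is proved, stated in full; the proofs are below) =====
def Claim_equal_shuffle_text : Prop := ∀ (text : String) (permutation : List Int), Dom_shuffle_text text permutation → Pre_shuffle_text text permutation → Spec_shuffle_text text permutation (shuffle_text text permutation)

-- ===== LEMMAS AND PROOFS =====

-- A's loop of in-place sets over range m rewrites the first m cells to g 0, …, g (m-1).
lemma set_loop (g : Nat → Char) : ∀ (m : Nat) (nt : List Char), m ≤ nt.length →
    (List.range m).foldl (fun nt k => nt.set k (g k)) nt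
      = (List.range m).map g ++ nt.drop m := by
  intro m
  induction m with
  | zero => simp
  | succ m ih =>
    intro nt hm
    rw [List.range_succ, List.foldl_append, List.map_append]
    simp only [List.foldl_cons, List.foldl_nil, List.map_cons, List.map_nil]
    rw [ih nt (by omega)]
    have hlen : ((List.range m).map g).length = m := by simp
    have hdrop : nt.drop m = nt[m] :: nt.drop (m + 1) :=
      List.drop_eq_getElem_cons (by omega)
    rw [hdrop, List.set_append_right _ _ (by simp), hlen, Nat.sub_self,
        List.set_cons_zero, List.append_assoc, List.singleton_append]

-- a range over nb*p positions flattens into a block-by-block flatMap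
lemma range_blocks (nb p : Nat) (g : Nat → Char) :
    (List.range (nb * p)).map g
      = (List.range nb).flatMap (fun b => (List.range p).map (fun i => g (b * p + i))) := by
  induction nb with
  | zero => simp
  | succ nb ih =>
    rw [Nat.succ_mul, List.range_add, List.map_append, ih, List.range_succ,
        List.flatMap_append]
    simp [List.map_map, Function.comp]

-- one step of pvZipRows on uniform cons-shaped columns
lemma pvZipRows_cons {α : Type} (L : List α) (hL : L ≠ []) (g t : α → List Char) (c : α → Char)
    (hc : ∀ s, g s = c s :: t s) :
    pvZipRows (L.map g) = L.map c :: pvZipRows (L.map t) := by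
  rw [pvZipRows]
  rw [dif_pos ⟨by simpa using hL, by
    simp only [List.all_map, List.all_eq_true]
    intro s _; simp [hc s]⟩]
  simp only [List.map_map]
  have h1 : List.map ((fun c => c.headD ' ') ∘ g) L = List.map c L :=
    List.map_congr_left (fun s _ => by simp [hc s])
  have h2 : List.map ((fun c => c.tail) ∘ g) L = List.map t L :=
    List.map_congr_left (fun s _ => by simp [hc s])
  rw [h1, h2]

-- pvZipRows of the column family is the row family
lemma pvZipRows_range {α : Type} (nb : Nat) (L : List α) (hL : L ≠ []) (f : α → Nat → Char) :
    pvZipRows (L.map (fun s => (List.range nb).map (f s)))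
      = (List.range nb).map (fun b => L.map (fun s => f s b)) := by
  induction nb generalizing f with
  | zero =>
    rw [pvZipRows]
    rw [dif_neg]
    · simp
    · intro ⟨_, hall⟩
      obtain ⟨s, rest, rfl⟩ : ∃ s rest, L = s :: rest := by
        cases L with
        | nil => exact absurd rfl hL
        | cons s rest => exact ⟨s, rest, rfl⟩
      simp at hall
  | succ nb ih =>
    have hcons : ∀ s : α, (List.range (nb + 1)).map (f s)
        = f s 0 :: (List.range nb).map (fun b => f s (b + 1)) := by
      intro s
      rw [List.range_succ_eq_map]
      simp [List.map_map, Function.comp]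
    rw [pvZipRows_cons L hL _ (fun s => (List.range nb).map (fun b => f s (b + 1)))
        (fun s => f s 0) hcons,
      ih (fun s b => f s (b + 1)), List.range_succ_eq_map]
    simp [List.map_map, Function.comp]

theorem shuffle_text_spec : Claim_equal_shuffle_text := by
  intro text permutation _ hpre
  obtain ⟨hne, _⟩ := hpre
  unfold Spec_shuffle_text shuffle_text shuffle_text_alt
  set chars := text.toList with hchars
  set p := permutation.length with hp
  have hp0 : 0 < p := List.length_pos_iff.mpr hne
  set n := chars.length with hn
  set nb := n / p with hnb
  set g : Nat → Char := fun k => PySem.List.pyGetD chars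
      ((k : Int) - ((k % p : Nat) : Int) + permutation.getD (k % p) 0) ' ' with hg
  have hmul : nb * p = n - n % p := by rw [hnb]; exact Nat.div_mul_self_eq_mod_sub_self
  have hle : nb * p ≤ n := by omega
  have hproc : ((n : Int) - PySem.Int.mod (n : Int) (p : Int)) = ((nb * p : Nat) : Int) := by
    rw [PySem.Int.mod_natCast, hmul]
    have := Nat.mod_le n p
    push_cast [Nat.cast_sub this]
    ring
  simp only [PySem.List.len_eq, ← hn, ← hp, hproc]
  simp only [← hnb]
  -- A's side: pyRange foldl of in-place sets → map g ++ untouched tail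
  rw [PySem.List.pyRange_one]
  simp only [Int.sub_zero, Int.toNat_natCast, zero_add]
  have hbody : ∀ (nt : List Char) (k : Nat), k ∈ List.range (nb * p) →
      (PySem.List.pySetD nt ((k : Int))
        (PySem.List.pyGetD chars ((k : Int) - PySem.Int.mod (k : Int) (p : Int)
            + PySem.List.pyGetD permutation (PySem.Int.mod (k : Int) (p : Int)) 0) ' '))
        = nt.set k (g k) := by
    intro nt k _
    rw [PySem.Int.mod_natCast, PySem.List.pyGetD_natCast, PySem.List.pySetD_natCast, hg]
  simp only [List.foldl_map]
  rw [PySem.List.foldl_congr_mem (List.range (nb * p)) _ (fun nt k => nt.set k (g k)) chars hbody,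
      set_loop g (nb * p) chars hle]
  -- B's side: pvZipRows of the columns flattens to the same block-by-block rows
  rw [pvZipRows_range nb permutation hne
      (fun s b => PySem.List.pyGetD chars (((b * p : Nat) : Int) + s) ' ')]
  -- the processed prefix agrees block by block
  have hblock : ∀ b : Nat, (List.range p).map (fun i => g (b * p + i))
      = permutation.map (fun s => PySem.List.pyGetD chars (((b * p : Nat) : Int) + s) ' ') := by
    intro b
    apply List.ext_getElem (by simp [hp])
    intro i h1 h2
    have hip : i < p := by simpa using h1
    have hil : i < permutation.length := by omega
    simp only [List.getElem_map, List.getElem_range]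
    have hmod : (b * p + i) % p = i := by
      rw [Nat.add_mod, Nat.mul_mod_left, Nat.zero_add, Nat.mod_mod_of_dvd,
          Nat.mod_eq_of_lt hip]
      exact dvd_refl p
    rw [hg]
    simp only [hmod]
    rw [List.getD_eq_getElem _ _ hil]
    congr 1
    push_cast
    ring
  rw [range_blocks nb p g]
  simp only [hblock]
  simp [List.flatMap_def]
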